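-- pv_equiv track=rewrite | github.com/Noble-Mushtak/Linear-Algebra-Library | numerical.py | matrix_row_multiplication
-- ===== SOURCE A (Python) =====
-- def matrix_row_multiplication(matrix, row_index, scalar):
--     '''
--     Given a matrix, an integer representing the index of a row,
--      and a scalar,
--      multiply the appropriate row in the matrix by the given scalar.
--
--     Note that this does not modify the given matrix in place,
--      but rather returns a new matrix.
--     '''
--     if row_index < 0 or row_index >= len(matrix):
--         raise ValueError("Row index does not make sense")
--
--     return [
--         [
--             (scalar if (i == row_index) else 1)*matrix[i][j]
--             for j in range(len(matrix[i]))
--         ]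
--         for i in range(len(matrix))
--     ]
-- ===== SOURCE B (Python) =====
-- def matrix_row_multiplication(matrix, row_index, scalar):
--     if row_index < 0 or row_index >= len(matrix):
--         raise ValueError("Row index does not make sense")
--
--     def go(rows, k):
--         # recurse down the list of rows, counting k down to the target row
--         if k == 0:
--             return [[scalar * x for x in rows[0]]] + rows[1:]
--         return [rows[0]] + go(rows[1:], k - 1)
--
--     return go(matrix, row_index)
-- ===== Notes on version B (the rewrite author's own statement) =====
-- stated objective: alternative
-- what changed: B replaces A's index-driven double comprehension (multiplying every element by 1 or scalar) with a structural recursion over the row list that counts the index down, scales the target row when the counter hits zero, and returns the untouched tail as-is without visiting its elements.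
import Mathlib
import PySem

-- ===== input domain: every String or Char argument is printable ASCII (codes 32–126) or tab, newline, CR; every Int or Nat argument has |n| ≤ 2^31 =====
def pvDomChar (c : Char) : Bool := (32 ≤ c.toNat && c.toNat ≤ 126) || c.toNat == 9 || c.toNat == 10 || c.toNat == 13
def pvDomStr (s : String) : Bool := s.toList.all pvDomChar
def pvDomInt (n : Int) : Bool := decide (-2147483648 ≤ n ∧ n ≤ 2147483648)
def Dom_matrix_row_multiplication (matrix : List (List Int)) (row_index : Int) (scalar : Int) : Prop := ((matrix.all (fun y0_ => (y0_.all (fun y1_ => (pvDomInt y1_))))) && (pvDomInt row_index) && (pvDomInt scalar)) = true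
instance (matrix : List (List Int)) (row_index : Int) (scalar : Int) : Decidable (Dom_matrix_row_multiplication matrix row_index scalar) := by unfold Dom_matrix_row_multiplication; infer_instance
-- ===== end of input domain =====

-- B replaces A's index-driven double comprehension with a structural recursion counting the index down; return values proved equal on Pre_ (where A returns).

-- ===== PORT A =====
-- Literal port of A: nested comprehension, each element multiplied by (scalar if i == row_index else 1).
-- Where the Python raises ValueError (row_index out of range) the port returns [] (excluded by Pre_).
def matrix_row_multiplication (matrix : List (List Int)) (row_index : Int) (scalar : Int) : List (List Int) :=
  if row_index < 0 ∨ row_index ≥ (matrix.length : Int) then []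
  else (List.range matrix.length).map (fun i =>
    let row := matrix.getD i []
    (List.range row.length).map (fun j =>
      (if (i : Int) = row_index then scalar else 1) * row.getD j 0))

-- ===== PORT B =====
-- B's recursive helper `go`: count k down along the rows; at 0 scale the head row, return the tail untouched.
-- (go rows k with rows = [] is unreachable in B since k < len(rows) at every call; the port returns [] there.)
def goScaleRow (scalar : Int) : List (List Int) → Nat → List (List Int)
  | [], _ => []
  | r :: rest, 0 => (r.map (fun x => scalar * x)) :: rest
  | r :: rest, Nat.succ k => r :: goScaleRow scalar rest k

def matrix_row_multiplication_alt (matrix : List (List Int)) (row_index : Int) (scalar : Int) : List (List Int) :=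
  if row_index < 0 ∨ row_index ≥ (matrix.length : Int) then []
  else goScaleRow scalar matrix row_index.toNat

-- ===== PRECONDITION & SPEC =====
-- Pre_ excludes exactly the inputs where the Python A raises ValueError (row_index out of range).
def Pre_matrix_row_multiplication (matrix : List (List Int)) (row_index : Int) (scalar : Int) : Prop :=
  0 ≤ row_index ∧ row_index < (matrix.length : Int)
instance (matrix : List (List Int)) (row_index : Int) (scalar : Int) : Decidable (Pre_matrix_row_multiplication matrix row_index scalar) := by unfold Pre_matrix_row_multiplication; infer_instance
def pvWitness_matrix_row_multiplication : List (List Int) × Int × Int := ([[1, 2], [3, 4]], 1, 5)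
def Spec_matrix_row_multiplication (matrix : List (List Int)) (row_index : Int) (scalar : Int) (out : List (List Int)) : Prop := out = matrix_row_multiplication_alt matrix row_index scalar
instance (matrix : List (List Int)) (row_index : Int) (scalar : Int) (out : List (List Int)) : Decidable (Spec_matrix_row_multiplication matrix row_index scalar out) := by unfold Spec_matrix_row_multiplication; infer_instance

-- ===== CLAIM (what is proved, stated in full; the proofs are below) =====
def Claim_equal_matrix_row_multiplication : Prop := ∀ (matrix : List (List Int)) (row_index : Int) (scalar : Int), Dom_matrix_row_multiplication matrix row_index scalar → Pre_matrix_row_multiplication matrix row_index scalar → Spec_matrix_row_multiplication matrix row_index scalar (matrix_row_multiplication matrix row_index scalar)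

-- ===== LEMMAS AND PROOFS =====
theorem goScaleRow_length (scalar : Int) : ∀ (m : List (List Int)) (k : Nat), (goScaleRow scalar m k).length = m.length := by
  intro m
  induction m with
  | nil => intro k; rfl
  | cons r rest ih =>
    intro k
    cases k with
    | zero => simp [goScaleRow]
    | succ k => simp [goScaleRow, ih k]

theorem goScaleRow_getElem (scalar : Int) : ∀ (m : List (List Int)) (k i : Nat) (hi : i < m.length)
    (hg : i < (goScaleRow scalar m k).length),
    (goScaleRow scalar m k)[i] = if i = k then m[i].map (fun x => scalar * x) else m[i] := by
  intro m
  induction m with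
  | nil => intro k i hi; simp at hi
  | cons r rest ih =>
    intro k i hi hg
    cases k with
    | zero =>
      cases i with
      | zero => simp [goScaleRow]
      | succ i => simp [goScaleRow]
    | succ k =>
      cases i with
      | zero => simp [goScaleRow]
      | succ i =>
        have hi' : i < rest.length := by simpa using hi
        have hg' : i < (goScaleRow scalar rest k).length := by
          rw [goScaleRow_length]; exact hi'
        simp only [goScaleRow, List.getElem_cons_succ]
        rw [ih k i hi' hg']
        simp

-- ===== VERDICT (by name: the statement is the Claim_ definition above) =====
theorem matrix_row_multiplication_spec : Claim_equal_matrix_row_multiplication := by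
  intro matrix row_index scalar _ hpre
  obtain ⟨h0, hlt⟩ := hpre
  unfold Spec_matrix_row_multiplication matrix_row_multiplication matrix_row_multiplication_alt
  have hnot : ¬ (row_index < 0 ∨ row_index ≥ (matrix.length : Int)) := by omega
  simp only [if_neg hnot]
  apply List.ext_getElem
  · simp [goScaleRow_length]
  · intro i hi1 hi2
    have hi : i < matrix.length := by
      have := goScaleRow_length scalar matrix row_index.toNat
      omega
    rw [goScaleRow_getElem scalar matrix row_index.toNat i hi hi2]
    have hrow : matrix.getD i [] = matrix[i] := by
      simp [List.getD_eq_getElem?_getD, List.getElem?_eq_getElem hi]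
    simp only [List.getElem_map, List.getElem_range, hrow]
    by_cases hieq : i = row_index.toNat
    · have hcast : ((i : Nat) : Int) = row_index := by omega
      simp only [if_pos hieq, hcast, if_pos rfl]
      apply List.ext_getElem
      · simp
      · intro j hj1 hj2
        have hj : j < matrix[i].length := by simpa using hj1
        simp [List.getD_eq_getElem?_getD, List.getElem?_eq_getElem hj]
    · have hne : ((i : Nat) : Int) ≠ row_index := by omega
      simp only [if_neg hieq, if_neg hne]
      apply List.ext_getElem
      · simp
      · intro j hj1 hj2
        have hj : j < matrix[i].length := by simpa using hj1
        simp [List.getD_eq_getElem?_getD, List.getElem?_eq_getElem hj]
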